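-- pv_equiv track=rewrite | github.com/katie-minji/freeze-analyze | pl_setup_func.py | ctr_fs_separate
-- ===== SOURCE A (Python) =====
-- def ctr_fs_separate(my_dict, condition):
--
--     if condition == 1:
--         my_fs = {key: value for key,value in my_dict.items() if not ('833_N' in key or '833_RL' in key or '868_N' in key)}
--         my_ctr = {key: value for key,value in my_dict.items() if ('833_N' in key or '833_RL' in key or '868_N' in key)}
--
--     elif condition == 5:
--         my_fs = {key: value for key,value in my_dict.items() if not ('833_R' in key)}
--         my_ctr = {key: value for key,value in my_dict.items() if ('833_R' in key)}
--
--     else: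
--         my_fs = {key: value for key,value in my_dict.items() if not ('ctr' in key)}
--         my_ctr = {key: value for key,value in my_dict.items() if ('ctr' in key)}
--
--     return my_fs, my_ctr
-- ===== SOURCE B (Python) =====
-- def ctr_fs_separate(my_dict, condition):
--     if condition == 1:
--         pred = lambda k: '833_N' in k or '833_RL' in k or '868_N' in k
--     elif condition == 5:
--         pred = lambda k: '833_R' in k
--     else:
--         pred = lambda k: 'ctr' in k
--     # stable sort by the predicate: non-matching (False) items first, matching last,
--     # each side keeping its original order; then split at the counted boundary
--     items = sorted(my_dict.items(), key=lambda kv: pred(kv[0]))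
--     n_fs = sum(1 for k, _ in items if not pred(k))
--     return dict(items[:n_fs]), dict(items[n_fs:])
-- ===== Notes on version B (the rewrite author's own statement) =====
-- stated objective: alternative
-- what changed: B stably sorts the items by the boolean match-predicate (non-matching first), counts the non-matching items, and splits the sorted list at that boundary into (my_fs, my_ctr), instead of A's two complementary dict-comprehension scans per branch.
import Mathlib
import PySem

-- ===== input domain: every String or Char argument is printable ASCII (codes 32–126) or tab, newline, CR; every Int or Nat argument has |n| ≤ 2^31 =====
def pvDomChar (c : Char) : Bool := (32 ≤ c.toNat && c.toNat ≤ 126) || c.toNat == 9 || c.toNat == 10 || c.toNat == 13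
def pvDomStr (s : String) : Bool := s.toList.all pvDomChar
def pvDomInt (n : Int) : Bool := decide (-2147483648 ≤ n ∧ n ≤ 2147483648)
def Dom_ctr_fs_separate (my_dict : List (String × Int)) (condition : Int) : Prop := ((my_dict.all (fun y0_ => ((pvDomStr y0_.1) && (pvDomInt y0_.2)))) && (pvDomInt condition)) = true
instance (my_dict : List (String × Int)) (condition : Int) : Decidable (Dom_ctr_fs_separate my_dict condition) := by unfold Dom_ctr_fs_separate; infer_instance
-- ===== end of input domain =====

-- B replaces A's two mirrored comprehension scans per branch by a stable sort on the boolean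
-- predicate followed by a split at the counted boundary (objective: alternative algorithm).


-- ===== PORT A =====
-- Each dict comprehension over my_dict.items() with a key predicate is a filter in insertion order.
def ctr_fs_separate (my_dict : List (String × Int)) (condition : Int) : (List (String × Int)) × (List (String × Int)) :=
  if condition = 1 then
    (my_dict.filter (fun kv => !(PySem.Str.isIn "833_N" kv.1 || PySem.Str.isIn "833_RL" kv.1 || PySem.Str.isIn "868_N" kv.1)),
     my_dict.filter (fun kv => (PySem.Str.isIn "833_N" kv.1 || PySem.Str.isIn "833_RL" kv.1 || PySem.Str.isIn "868_N" kv.1)))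
  else if condition = 5 then
    (my_dict.filter (fun kv => !(PySem.Str.isIn "833_R" kv.1)),
     my_dict.filter (fun kv => (PySem.Str.isIn "833_R" kv.1)))
  else
    (my_dict.filter (fun kv => !(PySem.Str.isIn "ctr" kv.1)),
     my_dict.filter (fun kv => (PySem.Str.isIn "ctr" kv.1)))

-- ===== PORT B =====
-- sorted(..., key=lambda kv: pred(kv[0])) is PySem.List.sorted (stable, False < True);
-- the counting generator sum is the counting fold; items[:n]/items[n:] are PySem.List.slice.
def ctr_fs_separate_alt (my_dict : List (String × Int)) (condition : Int) : (List (String × Int)) × (List (String × Int)) :=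
  let pred : String → Bool :=
    if condition = 1 then
      fun k => PySem.Str.isIn "833_N" k || PySem.Str.isIn "833_RL" k || PySem.Str.isIn "868_N" k
    else if condition = 5 then
      fun k => PySem.Str.isIn "833_R" k
    else
      fun k => PySem.Str.isIn "ctr" k
  let items := PySem.List.sorted my_dict (fun kv => pred kv.1) false
  let n_fs : Int := items.foldl (fun acc kv => if !pred kv.1 then acc + 1 else acc) 0
  (PySem.List.slice items none (some n_fs), PySem.List.slice items (some n_fs) none)

-- ===== PRECONDITION & SPEC =====
def Spec_ctr_fs_separate (my_dict : List (String × Int)) (condition : Int) (out : (List (String × Int)) × (List (String × Int))) : Prop := out = ctr_fs_separate_alt my_dict condition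
instance (my_dict : List (String × Int)) (condition : Int) (out : (List (String × Int)) × (List (String × Int))) : Decidable (Spec_ctr_fs_separate my_dict condition out) := by unfold Spec_ctr_fs_separate; infer_instance

-- ===== CLAIM =====
def Claim_equal_ctr_fs_separate : Prop := ∀ (my_dict : List (String × Int)) (condition : Int), Dom_ctr_fs_separate my_dict condition → Spec_ctr_fs_separate my_dict condition (ctr_fs_separate my_dict condition)

-- ===== LEMMAS AND PROOFS =====
-- Inserting x into F ++ C passes every element of F (before = false) and stops at C's head.
theorem insertBy_skip_stop {α : Type} (b : α → α → Bool) (x : α) :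
    ∀ (F C : List α), (∀ y ∈ F, b x y = false) → (∀ c cs, C = c :: cs → b x c = true) →
      PySem.List.insertBy b x (F ++ C) = F ++ x :: C := by
  intro F
  induction F with
  | nil =>
    intro C _ hC
    cases C with
    | nil => simp [PySem.List.insertBy]
    | cons c cs => simp [PySem.List.insertBy, hC c cs rfl]
  | cons f F' ih =>
    intro C hF hC
    have hf : b x f = false := hF f (by simp)
    simp [PySem.List.insertBy, hf, ih C (fun y hy => hF y (by simp [hy])) hC]

-- The stable-insertion fold keeps the (all-false ++ all-true) partition and extends each side in order.
theorem foldl_insertBy_partition {α : Type} (p : α → Bool) :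
    ∀ (l F C : List α), (∀ y ∈ F, p y = false) → (∀ y ∈ C, p y = true) →
      l.foldl (fun acc x => PySem.List.insertBy (fun a b => decide (p a < p b)) x acc) (F ++ C)
        = (F ++ l.filter (fun x => !p x)) ++ (C ++ l.filter p) := by
  intro l
  induction l with
  | nil => simp
  | cons x t ih =>
    intro F C hF hC
    by_cases hp : p x = true
    · have h1 : PySem.List.insertBy (fun a b => decide (p a < p b)) x (F ++ C) = (F ++ C) ++ [x] := by
        apply PySem.List.insertBy_of_forall_not_before
        intro y _; simp [hp, Bool.lt_iff]
      have h2 := ih F (C ++ [x]) hF (by intro y hy; rcases List.mem_append.1 hy with h | h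
                                        · exact hC y h
                                        · simp at h; simpa [h] using hp)
      simp only [List.foldl_cons, h1]
      rw [show (F ++ C) ++ [x] = F ++ (C ++ [x]) by simp, h2]
      simp [hp]
    · have hpx : p x = false := by simpa using hp
      have h1 : PySem.List.insertBy (fun a b => decide (p a < p b)) x (F ++ C) = F ++ x :: C := by
        apply insertBy_skip_stop
        · intro y hy; simp [hpx, hF y hy]
        · intro c cs hcs; simp [hpx, hC c (by simp [hcs]), Bool.lt_iff]
      have h2 := ih (F ++ [x]) C (by intro y hy; rcases List.mem_append.1 hy with h | h
                                     · exact hF y h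
                                     · simp at h; simpa [h] using hpx) hC
      simp only [List.foldl_cons, h1]
      rw [show F ++ x :: C = (F ++ [x]) ++ C by simp, h2]
      simp [hpx]

-- sorted by a boolean key is (filter ¬p) ++ (filter p), each side in original order.
theorem sorted_bool_key {α : Type} (p : α → Bool) (l : List α) :
    PySem.List.sorted l (fun x => p x) false = l.filter (fun x => !p x) ++ l.filter p := by
  rw [PySem.List.sorted_eq_foldl_insertBy]
  have := foldl_insertBy_partition p l [] [] (by simp) (by simp)
  simpa using this

-- the whole pipeline for one fixed predicate
theorem pipeline_eq {α : Type} (p : α → Bool) (l : List α) :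
    (PySem.List.slice (PySem.List.sorted l (fun x => p x) false) none
        (some ((PySem.List.sorted l (fun x => p x) false).foldl (fun acc x => if !p x then acc + 1 else acc) 0)),
     PySem.List.slice (PySem.List.sorted l (fun x => p x) false)
        (some ((PySem.List.sorted l (fun x => p x) false).foldl (fun acc x => if !p x then acc + 1 else acc) 0)) none)
      = (l.filter (fun x => !p x), l.filter p) := by
  rw [sorted_bool_key]
  set F := l.filter (fun x => !p x) with hFdef
  set C := l.filter p with hCdef
  have hcount : (F ++ C).foldl (fun acc x => if !p x then acc + 1 else acc) 0 = (F.length : Int) := by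
    rw [PySem.List.foldl_if_add_one (fun x => !p x) (F ++ C) 0]
    have h1 : (F ++ C).countP (fun x => !p x) = F.length := by
      rw [List.countP_append]
      have hF : F.countP (fun x => !p x) = F.length := by
        apply List.countP_eq_length.2; intro a ha
        simp only [hFdef] at ha; simpa using List.of_mem_filter ha
      have hC : C.countP (fun x => !p x) = 0 := by
        apply List.countP_eq_zero.2; intro a ha
        simp only [hCdef] at ha; simpa using List.of_mem_filter ha
      omega
    rw [h1]; simp
  rw [hcount, PySem.List.slice_to_natCast, PySem.List.slice_from_natCast]
  simp

-- ===== VERDICT =====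
theorem ctr_fs_separate_spec : Claim_equal_ctr_fs_separate := by
  intro my_dict condition _
  unfold Spec_ctr_fs_separate ctr_fs_separate ctr_fs_separate_alt
  by_cases h1 : condition = 1
  · simp only [h1]
    exact (pipeline_eq (fun k : String × Int => PySem.Str.isIn "833_N" k.1 || PySem.Str.isIn "833_RL" k.1 || PySem.Str.isIn "868_N" k.1) my_dict).symm
  · by_cases h5 : condition = 5
    · simp only [h5]
      exact (pipeline_eq (fun k : String × Int => PySem.Str.isIn "833_R" k.1) my_dict).symm
    · simp only [if_neg h1, if_neg h5]
      exact (pipeline_eq (fun k : String × Int => PySem.Str.isIn "ctr" k.1) my_dict).symm
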